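-- pv_equiv track=rewrite | github.com/TomJGooding/data-structures-and-algorithms | src/data_structures_and_algorithms/dynamic_programming.py | add_until_100
-- ===== SOURCE A (Python) =====
-- def add_until_100(numbers: list[int]) -> int:
--     if not numbers:
--         return 0
--
--     sum_of_remaining_numbers: int = add_until_100(numbers[1:])
--     if numbers[0] + sum_of_remaining_numbers > 100:
--         return sum_of_remaining_numbers
--     else:
--         return numbers[0] + sum_of_remaining_numbers
-- ===== SOURCE B (Python) =====
-- def add_until_100(numbers: list[int]) -> int:
--     total = 0
--     for x in reversed(numbers):
--         if x + total <= 100: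
--             total += x
--     return total
-- ===== Notes on version B (the rewrite author's own statement) =====
-- stated objective: faster
-- what changed: Replaced the recursion with O(n^2) list slicing by a single right-to-left loop with a running total.
import Mathlib
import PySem

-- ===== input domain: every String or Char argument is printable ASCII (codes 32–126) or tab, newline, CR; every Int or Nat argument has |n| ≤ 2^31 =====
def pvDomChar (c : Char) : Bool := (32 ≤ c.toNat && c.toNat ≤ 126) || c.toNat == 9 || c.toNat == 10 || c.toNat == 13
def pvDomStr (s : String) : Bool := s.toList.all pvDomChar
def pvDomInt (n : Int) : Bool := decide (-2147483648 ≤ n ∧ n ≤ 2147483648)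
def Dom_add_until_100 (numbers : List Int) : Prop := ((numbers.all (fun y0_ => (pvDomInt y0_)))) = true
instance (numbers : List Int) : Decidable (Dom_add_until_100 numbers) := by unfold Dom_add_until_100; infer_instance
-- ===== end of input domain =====

-- B replaces A's recursion over numbers[1:] slices by one right-to-left loop with a running total (faster: O(n) vs O(n^2)).

-- ===== PORT A =====
-- A recurses on numbers[1:]; on a cons that slice is the tail, so structural recursion is the literal port.
def add_until_100 (numbers : List Int) : Int :=
  match numbers with
  | [] => 0
  | x :: rest =>
    let sum_of_remaining_numbers := add_until_100 rest
    if x + sum_of_remaining_numbers > 100 then sum_of_remaining_numbers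
    else x + sum_of_remaining_numbers

-- ===== PORT B =====
def add_until_100_alt (numbers : List Int) : Int :=
  numbers.reverse.foldl (fun total x => if x + total ≤ 100 then total + x else total) 0

-- ===== PRECONDITION & SPEC =====
def Spec_add_until_100 (numbers : List Int) (out : Int) : Prop := out = add_until_100_alt numbers
instance (numbers : List Int) (out : Int) : Decidable (Spec_add_until_100 numbers out) := by unfold Spec_add_until_100; infer_instance

-- ===== CLAIM (what is proved, stated in full; the proofs are below) =====
def Claim_equal_add_until_100 : Prop := ∀ (numbers : List Int), Dom_add_until_100 numbers → Spec_add_until_100 numbers (add_until_100 numbers)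

-- ===== LEMMAS AND PROOFS =====
theorem add_until_100_eq_alt (numbers : List Int) :
    add_until_100 numbers = add_until_100_alt numbers := by
  unfold add_until_100_alt
  rw [List.foldl_reverse]
  induction numbers with
  | nil => simp [add_until_100]
  | cons x rest ih =>
    simp only [add_until_100, List.foldr_cons, ih]
    by_cases h : x + List.foldr (fun x y => if x + y ≤ 100 then y + x else y) 0 rest > 100
    · simp [h, not_le.mpr h]
    · have h' : x + List.foldr (fun x y => if x + y ≤ 100 then y + x else y) 0 rest ≤ 100 := not_lt.mp h
      simp [h, h']
      omega

-- ===== VERDICT (by name: the statement is the Claim_ definition above) =====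
theorem add_until_100_spec : Claim_equal_add_until_100 := by
  intro numbers _
  exact add_until_100_eq_alt numbers
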